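-- pv_equiv track=rewrite | github.com/Gwyneth-Chen/NLP-Q-A-System---Team-Name | syntactic_qg.py | construct_question
-- ===== SOURCE A (Python) =====
-- def construct_question(tokens):
--     firstToken = tokens[0].capitalize()
--     if not firstToken[0].isalpha():
--         return []
--     qtext = firstToken
--     in_parenthetical = False
--     for token in tokens[1:]:
--         if token[0] in ["("]:
--             in_parenthetical = True
--             continue
--         if in_parenthetical:
--             if token[0] in [")"]:
--                 in_parenthetical = False
--             continue
--         if token[0].isalnum():
--             qtext += " " + token
--         else:
--             qtext += token
--     qtext = qtext.strip()
--     if qtext[-1] not in ".!?":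
--         return []
--     return [qtext[:-1] + "?"]
-- ===== SOURCE B (Python) =====
-- def _split_at_open(rest):
--     # tokens before the first "("-token, and the tokens after that "("-token
--     for i, t in enumerate(rest):
--         if t[0] == "(":
--             return rest[:i], rest[i + 1:]
--     return rest, []
--
--
-- def _after_close(rest):
--     # tokens after the first ")"-token (empty if there is none)
--     for j, t in enumerate(rest):
--         if t[0] == ")":
--             return rest[j + 1:]
--     return []
--
--
-- def construct_question(tokens):
--     first = tokens[0].capitalize()
--     if not first[0].isalpha():
--         return []
--     kept = []
--     rest = tokens[1:]
--     while rest: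
--         pre, after_open = _split_at_open(rest)
--         kept += pre
--         rest = _after_close(after_open)
--     qtext = first + "".join((" " + t) if t[0].isalnum() else t for t in kept)
--     qtext = qtext.strip()
--     if qtext[-1] not in ".!?":
--         return []
--     return [qtext[:-1] + "?"]
-- ===== Notes on version B (the rewrite author's own statement) =====
-- stated objective: alternative
-- what changed: Replaces A's per-token boolean state machine with a segment-extraction algorithm: helper searches locate the next '('-token and the matching ')'-token and slice the list, so the kept tokens are gathered segment by segment and the question is built by one join over the mapped segments.
import Mathlib
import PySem

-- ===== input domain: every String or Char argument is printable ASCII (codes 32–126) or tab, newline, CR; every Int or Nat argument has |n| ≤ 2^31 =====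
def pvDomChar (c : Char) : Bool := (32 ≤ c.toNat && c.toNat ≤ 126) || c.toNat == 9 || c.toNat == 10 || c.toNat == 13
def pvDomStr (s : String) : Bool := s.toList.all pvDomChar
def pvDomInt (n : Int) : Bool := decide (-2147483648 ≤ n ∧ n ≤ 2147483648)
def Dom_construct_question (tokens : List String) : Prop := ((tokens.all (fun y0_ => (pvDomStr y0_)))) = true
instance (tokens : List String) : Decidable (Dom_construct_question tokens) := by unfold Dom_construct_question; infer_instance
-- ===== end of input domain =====

-- B replaces A's per-token boolean state machine by segment extraction: search-and-slice helpers find the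
-- next '('/')' tokens, kept segments are concatenated, and one join builds the text (objective: alternative).
-- Both Pythons raise IndexError on an empty token list or an empty token string; Pre_ excludes exactly those inputs.

-- ===== PORT A =====
-- str.capitalize() on the ASCII domain: first char uppercased, rest lowercased (exact there)
def pyCapitalize (s : List Char) : List Char :=
  match s with
  | [] => []
  | c :: r => PySem.Chars.upperChar c :: PySem.Chars.lower r

-- the body of A's for-loop: state = (qtext as chars, in_parenthetical)
def aStep (st : List Char × Bool) (token : String) : List Char × Bool :=
  let c := PySem.List.pyGetD token.toList 0 ' '   -- token[0]; default unreachable under Pre_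
  if c = '(' then (st.1, true)
  else if st.2 then (if c = ')' then (st.1, false) else st)
  else if PySem.Chars.isalnum c then (st.1 ++ ' ' :: token.toList, st.2)
  else (st.1 ++ token.toList, st.2)

def construct_question (tokens : List String) : List String :=
  let firstToken := pyCapitalize (PySem.List.pyGetD tokens 0 "").toList
  if ¬ PySem.Chars.isalpha (PySem.List.pyGetD firstToken 0 ' ') then []
  else
    let st := (tokens.drop 1).foldl aStep (firstToken, false)   -- tokens[1:]
    let qtext := PySem.Chars.strip st.1
    if ¬ (PySem.List.pyGetD qtext (-1) ' ' ∈ ['.', '!', '?']) then []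
    else [String.ofList (PySem.Chars.slice qtext none (some (-1)) ++ ['?'])]

-- ===== PORT B =====
-- _split_at_open: tokens before the first '('-token, and the tokens after that '('-token
def splitAtOpen : List String → List String × List String
  | [] => ([], [])
  | t :: r =>
    if PySem.List.pyGetD t.toList 0 ' ' = '(' then ([], r)
    else
      let p := splitAtOpen r
      (t :: p.1, p.2)

-- _after_close: tokens after the first ')'-token (empty if there is none)
def afterClose : List String → List String
  | [] => []
  | t :: r =>
    if PySem.List.pyGetD t.toList 0 ' ' = ')' then r
    else afterClose r

lemma afterClose_len_le (xs : List String) : (afterClose xs).length ≤ xs.length := by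
  induction xs with
  | nil => simp [afterClose]
  | cons t r ih =>
    simp only [afterClose]
    split
    · simp
    · exact Nat.le_trans ih (Nat.le_succ _)

lemma splitAtOpen_snd_len (xs : List String) : (splitAtOpen xs).2.length + 1 ≤ xs.length ∨ (splitAtOpen xs).2 = [] := by
  induction xs with
  | nil => right; simp [splitAtOpen]
  | cons t r ih =>
    simp only [splitAtOpen]
    split
    · left; simp
    · rcases ih with h | h
      · left; simpa using Nat.le_trans h (Nat.le_succ _)
      · right; simpa using h

lemma collect_dec (t : String) (r : List String) :
    (afterClose (splitAtOpen (t :: r)).2).length < (t :: r).length := by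
  rcases splitAtOpen_snd_len (t :: r) with h | h
  · have := afterClose_len_le (splitAtOpen (t :: r)).2
    omega
  · simp [h, afterClose]

-- B's while loop: gather the kept tokens segment by segment
def collectKept : List String → List String
  | [] => []
  | t :: r =>
    let p := splitAtOpen (t :: r)
    p.1 ++ collectKept (afterClose p.2)
termination_by rest => rest.length
decreasing_by exact collect_dec t r

-- (" " + t) if t[0].isalnum() else t
def bPiece (t : String) : List Char :=
  if PySem.Chars.isalnum (PySem.List.pyGetD t.toList 0 ' ') then ' ' :: t.toList else t.toList

def construct_question_alt (tokens : List String) : List String :=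
  let first := pyCapitalize (PySem.List.pyGetD tokens 0 "").toList
  if PySem.Chars.isalpha (PySem.List.pyGetD first 0 ' ') then
    -- "".join over the mapped kept tokens = flatten
    let qtext := PySem.Chars.strip (first ++ ((collectKept (tokens.drop 1)).map bPiece).flatten)
    if PySem.List.pyGetD qtext (-1) ' ' ∈ ['.', '!', '?'] then
      [String.ofList (PySem.Chars.slice qtext none (some (-1)) ++ ['?'])]
    else []
  else []

-- ===== PRECONDITION & SPEC =====
-- Pre_ excludes exactly the inputs where the Python A raises IndexError: an empty token list, an empty first
-- token, and (only when the first token starts with a letter, so the guard does not return early) a later empty token.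
def Pre_construct_question (tokens : List String) : Prop :=
  tokens ≠ [] ∧ tokens.headD "" ≠ "" ∧
    (PySem.Chars.isalpha (PySem.List.pyGetD (tokens.headD "").toList 0 ' ') = true →
      ∀ t ∈ tokens, t ≠ "")
instance (tokens : List String) : Decidable (Pre_construct_question tokens) := by
  unfold Pre_construct_question; infer_instance

def pvWitness_construct_question : List String := ["what", "is", "(", "an", ")", "apple", "?"]

def Spec_construct_question (tokens : List String) (out : List String) : Prop := out = construct_question_alt tokens
instance (tokens : List String) (out : List String) : Decidable (Spec_construct_question tokens out) := by unfold Spec_construct_question; infer_instance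

-- ===== CLAIM (what is proved, stated in full; the proofs are below) =====
def Claim_equal_construct_question : Prop := ∀ (tokens : List String), Dom_construct_question tokens → Pre_construct_question tokens → Spec_construct_question tokens (construct_question tokens)

-- ===== LEMMAS AND PROOFS =====

-- proof-side description of A's skipping as a flag-state token filter
def keepTokens : List String → Bool → List String
  | [], _ => []
  | t :: r, skipping =>
    let c := PySem.List.pyGetD t.toList 0 ' '
    if c = '(' then keepTokens r true
    else if skipping then (if c = ')' then keepTokens r false else keepTokens r true)
    else t :: keepTokens r skipping

-- A's loop appends exactly the mapped pieces of the kept tokens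
lemma loop_eq (rest : List String) : ∀ (q : List Char) (inp : Bool),
    (rest.foldl aStep (q, inp)).1 = q ++ ((keepTokens rest inp).map bPiece).flatten := by
  induction rest with
  | nil => intro q inp; simp [keepTokens]
  | cons t r ih =>
    intro q inp
    simp only [List.foldl_cons, aStep, keepTokens]
    by_cases h1 : PySem.List.pyGetD t.toList 0 ' ' = '('
    · simp [h1, ih]
    · by_cases h2 : inp
      · by_cases h3 : PySem.List.pyGetD t.toList 0 ' ' = ')'
        · simp [h2, h3, ih]
        · simp [h1, h2, h3, ih]
      · by_cases h4 : PySem.Chars.isalnum (PySem.List.pyGetD t.toList 0 ' ')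
        · simp [h1, h2, h4, ih, bPiece]
        · simp [h1, h2, h4, ih, bPiece]

-- skipping mode = drop through the first ')'-token
lemma keep_true_eq (rest : List String) : keepTokens rest true = keepTokens (afterClose rest) false := by
  induction rest with
  | nil => simp [afterClose, keepTokens]
  | cons t r ih =>
    simp only [keepTokens, afterClose]
    by_cases h1 : PySem.List.pyGetD t.toList 0 ' ' = '('
    · have h2 : PySem.List.pyGetD t.toList 0 ' ' ≠ ')' := by simp [h1]
      simp [h1, ih]
    · by_cases h3 : PySem.List.pyGetD t.toList 0 ' ' = ')'
      · simp [h3]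
      · simp [h1, h3, ih]

-- normal mode up to the first '('-token = the split's prefix, then skipping mode on the remainder
lemma keep_false_eq (rest : List String) :
    keepTokens rest false = (splitAtOpen rest).1 ++ keepTokens (splitAtOpen rest).2 true := by
  induction rest with
  | nil => simp [keepTokens, splitAtOpen]
  | cons t r ih =>
    simp only [keepTokens, splitAtOpen]
    by_cases h1 : PySem.List.pyGetD t.toList 0 ' ' = '('
    · simp [h1]
    · simp [h1, ih]

-- B's segment gathering computes exactly A's flag-state filter
lemma collectKept_eq (rest : List String) : collectKept rest = keepTokens rest false := by
  induction rest using collectKept.induct with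
  | case1 => simp [collectKept, keepTokens]
  | case2 t r p ih =>
    rw [collectKept, ih, ← keep_true_eq, ← keep_false_eq]

-- the common tail: positive vs negated form of the terminal-punctuation test
lemma finish_eq (q : List Char) :
    (if ¬ (PySem.List.pyGetD q (-1) ' ' ∈ ['.', '!', '?']) then ([] : List String)
     else [String.ofList (PySem.Chars.slice q none (some (-1)) ++ ['?'])])
    = (if PySem.List.pyGetD q (-1) ' ' ∈ ['.', '!', '?'] then
         [String.ofList (PySem.Chars.slice q none (some (-1)) ++ ['?'])]
       else []) := by
  by_cases h : PySem.List.pyGetD q (-1) ' ' ∈ ['.', '!', '?'] <;> simp [h]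

-- ===== VERDICT (by name: the statement is the Claim_ definition above) =====
theorem construct_question_spec : Claim_equal_construct_question := by
  intro tokens _ _
  show construct_question tokens = construct_question_alt tokens
  simp only [construct_question, construct_question_alt, loop_eq, collectKept_eq]
  by_cases h : PySem.Chars.isalpha
      (PySem.List.pyGetD (pyCapitalize (PySem.List.pyGetD tokens 0 "").toList) 0 ' ') = true
  · simp only [h, not_true_eq_false, if_false, if_true]
    exact finish_eq _
  · simp [h]
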